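-- pv_equiv track=rewrite | github.com/YashB63/GFG-Daily-Questions | Day 95/String comparison/string_comparison.py | stringComparsion
-- ===== SOURCE A (Python) =====
-- def stringComparsion(s1, s2):
--
--     i = 0
--     j = 0
--     n = len(s1)
--     m = len(s2)
--     while i < n and j < m:
--         if i+1 < n and j+1 < m and s1[i] == 'n' and s1[i+1] == 'g' and s2[j] == 'n' and s2[j+1] == 'g':
--             i+=2
--             j+=2
--         elif i+1 < n and s1[i] == 'n' and s1[i+1] == 'g':
--             if s2[j] > 'n':
--                 return -1
--             else:
--                 return 1
--         elif j+1 <m and s2[j] == 'n' and s2[j+1] == 'g':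
--             if s1[i] > 'n':
--                 return 1
--             else:
--                 return -1
--         elif s1[i] == s2[j]:
--             i+=1
--             j+=1
--         elif s1[i] < s2[j]:
--             return -1
--         else:
--             return 1
--     if i == n and j == m:
--         return 0
--     if i < n:
--         return 1
--     else:
--         return -1
-- ===== SOURCE B (Python) =====
-- NG_KEY = 2 * ord('n') + 1  # sorts strictly between 'n' (220) and 'o' (222)
--
-- def _keys(s):
--     # tokenize: 'ng' -> NG_KEY, any other char c -> 2*ord(c)
--     ks = []
--     i = 0
--     n = len(s)
--     while i < n:
--         if s[i] == 'n' and i + 1 < n and s[i + 1] == 'g':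
--             ks.append(NG_KEY)
--             i += 2
--         else:
--             ks.append(2 * ord(s[i]))
--             i += 1
--     return ks
--
-- def stringComparsion(s1, s2):
--     k1 = _keys(s1)
--     k2 = _keys(s2)
--     i = 0
--     while i < len(k1) and i < len(k2):
--         if k1[i] != k2[i]:
--             return -1 if k1[i] < k2[i] else 1
--         i += 1
--     if len(k1) == len(k2):
--         return 0
--     return 1 if len(k1) > len(k2) else -1
-- ===== Notes on version B (the rewrite author's own statement) =====
-- stated objective: alternative
-- what changed: Instead of a single merged index-walking loop with five ad-hoc branches, B first tokenizes each string into integer keys (plain char c -> 2*ord(c), the digraph 'ng' -> 2*ord('n')+1, which sorts strictly between 'n' and 'o') and then compares the two key lists lexicographically.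
import Mathlib
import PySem

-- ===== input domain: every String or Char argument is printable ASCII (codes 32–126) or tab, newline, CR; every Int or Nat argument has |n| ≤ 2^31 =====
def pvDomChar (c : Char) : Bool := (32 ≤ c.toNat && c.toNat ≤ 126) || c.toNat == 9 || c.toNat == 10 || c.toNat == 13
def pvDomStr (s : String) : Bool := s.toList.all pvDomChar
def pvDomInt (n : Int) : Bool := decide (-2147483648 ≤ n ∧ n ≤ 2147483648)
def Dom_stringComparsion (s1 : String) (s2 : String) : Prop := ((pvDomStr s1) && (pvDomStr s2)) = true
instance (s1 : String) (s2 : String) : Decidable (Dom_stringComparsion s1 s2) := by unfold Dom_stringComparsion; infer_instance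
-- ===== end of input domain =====

-- B replaces A's five-branch merged index walk by tokenize-to-integer-keys + lexicographic list compare (objective: alternative, same cost).

-- ===== PORT A =====
-- A's while loop advances indices i/j monotonically through s1/s2; ported as
-- structural recursion on the corresponding suffixes, branches in A's order.
def pvLoopA : List Char → List Char → Int
  | x :: xs, y :: ys =>
    if x = 'n' ∧ xs.head? = some 'g' ∧ y = 'n' ∧ ys.head? = some 'g' then
      pvLoopA xs.tail ys.tail
    else if x = 'n' ∧ xs.head? = some 'g' then
      (if y > 'n' then -1 else 1)
    else if y = 'n' ∧ ys.head? = some 'g' then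
      (if x > 'n' then 1 else -1)
    else if x = y then
      pvLoopA xs ys
    else if x < y then -1 else 1
  | [], [] => 0
  | _ :: _, [] => 1
  | [], _ :: _ => -1
termination_by a b => a.length + b.length
decreasing_by
  · simp [List.length_tail]; omega
  · simp; omega

def stringComparsion (s1 : String) (s2 : String) : Int :=
  pvLoopA s1.toList s2.toList

-- ===== PORT B =====
-- tokenize into ordering keys: 'ng' -> 221 (strictly between 'n' = 220 and 'o' = 222), c -> 2*ord(c)
def pvKeys : List Char → List Int
  | [] => []
  | c :: rest =>
    if c = 'n' ∧ rest.head? = some 'g' then 221 :: pvKeys rest.tail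
    else (2 * (c.toNat : Int)) :: pvKeys rest
termination_by l => l.length
decreasing_by
  · simp [List.length_tail]
  · simp

-- lexicographic comparison of the two key lists (Source B's index loop, on suffixes)
def pvLexCmp : List Int → List Int → Int
  | a :: as_, b :: bs =>
    if a ≠ b then (if a < b then -1 else 1) else pvLexCmp as_ bs
  | k1, k2 =>
    if k1.length = k2.length then 0
    else if k1.length > k2.length then 1 else -1

def stringComparsion_alt (s1 : String) (s2 : String) : Int :=
  pvLexCmp (pvKeys s1.toList) (pvKeys s2.toList)

-- ===== PRECONDITION & SPEC =====
def Spec_stringComparsion (s1 : String) (s2 : String) (out : Int) : Prop := out = stringComparsion_alt s1 s2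
instance (s1 : String) (s2 : String) (out : Int) : Decidable (Spec_stringComparsion s1 s2 out) := by unfold Spec_stringComparsion; infer_instance

-- ===== CLAIM (what is proved, stated in full; the proofs are below) =====
def Claim_equal_stringComparsion : Prop := ∀ (s1 : String) (s2 : String), Dom_stringComparsion s1 s2 → Spec_stringComparsion s1 s2 (stringComparsion s1 s2)

-- ===== LEMMAS AND PROOFS =====

theorem pv_char_lt_iff (x y : Char) : x < y ↔ (x.toNat : Int) < (y.toNat : Int) := by
  rw [Char.lt_def, UInt32.lt_iff_toNat_lt]
  exact Iff.symm Int.ofNat_lt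

theorem pv_main : ∀ (fuel : Nat) (a b : List Char), a.length + b.length ≤ fuel →
    pvLoopA a b = pvLexCmp (pvKeys a) (pvKeys b) := by
  intro fuel
  induction fuel with
  | zero =>
    intro a b h
    have ha : a = [] := by cases a <;> simp_all
    have hb : b = [] := by cases b <;> simp_all
    subst ha hb
    simp [pvLoopA, pvKeys, pvLexCmp]
  | succ n ih =>
    intro a b h
    match a, b with
    | [], [] => simp [pvLoopA, pvKeys, pvLexCmp]
    | x :: xs, [] =>
      simp only [pvLoopA, pvKeys, pvLexCmp]
      split_ifs <;> simp_all [pvLexCmp]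
    | [], y :: ys =>
      simp only [pvLoopA, pvKeys, pvLexCmp]
      split_ifs <;> simp_all [pvLexCmp]
    | x :: xs, y :: ys =>
      rw [pvLoopA]
      by_cases h1 : x = 'n' ∧ xs.head? = some 'g'
      · by_cases h2 : y = 'n' ∧ ys.head? = some 'g'
        · -- both 'ng': skip both tokens
          rw [if_pos ⟨h1.1, h1.2, h2.1, h2.2⟩]
          rw [pvKeys, if_pos h1, pvKeys, if_pos h2, pvLexCmp]
          simp only [ne_eq, not_true_eq_false, if_neg, if_false]
          exact ih xs.tail ys.tail (by
            simp only [List.length_cons] at h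
            have h1 : xs.tail.length = xs.length - 1 := List.length_tail
            have h2 : ys.tail.length = ys.length - 1 := List.length_tail
            omega)
        · -- s1 has 'ng', s2 does not
          have hne : ¬ (x = 'n' ∧ xs.head? = some 'g' ∧ y = 'n' ∧ ys.head? = some 'g') := by
            rintro ⟨_, _, hy1, hy2⟩; exact h2 ⟨hy1, hy2⟩
          rw [if_neg hne, if_pos h1]
          rw [pvKeys, if_pos h1, pvKeys, if_neg h2, pvLexCmp]
          have hy110 : y > 'n' ↔ (110 : Int) < (y.toNat : Int) := pv_char_lt_iff 'n' y
          by_cases hgt : y > 'n'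
          · have : (110 : Int) < (y.toNat : Int) := hy110.mp hgt
            rw [if_pos hgt]
            rw [if_pos (by omega : (221 : Int) ≠ 2 * (y.toNat : Int))]
            rw [if_pos (by omega : (221 : Int) < 2 * (y.toNat : Int))]
          · have : ¬ (110 : Int) < (y.toNat : Int) := fun hc => hgt (hy110.mpr hc)
            rw [if_neg hgt]
            rw [if_pos (by omega : (221 : Int) ≠ 2 * (y.toNat : Int))]
            rw [if_neg (by omega : ¬ (221 : Int) < 2 * (y.toNat : Int))]
      · have hne : ¬ (x = 'n' ∧ xs.head? = some 'g' ∧ y = 'n' ∧ ys.head? = some 'g') := by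
          rintro ⟨hx1, hx2, _, _⟩; exact h1 ⟨hx1, hx2⟩
        rw [if_neg hne, if_neg h1]
        by_cases h2 : y = 'n' ∧ ys.head? = some 'g'
        · -- s2 has 'ng', s1 does not
          rw [if_pos h2]
          rw [pvKeys, if_neg h1, pvKeys, if_pos h2, pvLexCmp]
          have hx110 : x > 'n' ↔ (110 : Int) < (x.toNat : Int) := pv_char_lt_iff 'n' x
          by_cases hgt : x > 'n'
          · have : (110 : Int) < (x.toNat : Int) := hx110.mp hgt
            rw [if_pos hgt]
            rw [if_pos (by omega : (2 * (x.toNat : Int)) ≠ 221)]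
            rw [if_neg (by omega : ¬ (2 * (x.toNat : Int)) < 221)]
          · have : ¬ (110 : Int) < (x.toNat : Int) := fun hc => hgt (hx110.mpr hc)
            rw [if_neg hgt]
            rw [if_pos (by omega : (2 * (x.toNat : Int)) ≠ 221)]
            rw [if_pos (by omega : (2 * (x.toNat : Int)) < 221)]
        · -- neither starts with 'ng'
          rw [if_neg h2]
          rw [pvKeys, if_neg h1, pvKeys, if_neg h2, pvLexCmp]
          by_cases heq : x = y
          · rw [if_pos heq]
            subst heq
            simp only [ne_eq, not_true_eq_false, if_neg, if_false]
            exact ih xs ys (by simp at h ⊢; omega)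
          · rw [if_neg heq]
            have hkne : (2 * (x.toNat : Int)) ≠ (2 * (y.toNat : Int)) := by
              intro hc
              apply heq
              have : x.toNat = y.toNat := by omega
              exact Char.ext (UInt32.toNat_inj.mp this)
            rw [if_pos hkne]
            by_cases hlt : x < y
            · have : (x.toNat : Int) < (y.toNat : Int) := (pv_char_lt_iff x y).mp hlt
              rw [if_pos hlt, if_pos (by omega)]
            · have : ¬ (x.toNat : Int) < (y.toNat : Int) :=
                fun hc => hlt ((pv_char_lt_iff x y).mpr hc)
              rw [if_neg hlt, if_neg (by omega)]

-- ===== VERDICT (by name: the statement is the Claim_ definition above) =====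
theorem stringComparsion_spec : Claim_equal_stringComparsion := by
  intro s1 s2 _
  unfold Spec_stringComparsion stringComparsion stringComparsion_alt
  exact pv_main (s1.toList.length + s2.toList.length) _ _ le_rfl
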